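-- pv_equiv track=rewrite | github.com/jackey-qiu/DaFy | EnginePool/models/domain_creator.py | generate_commands_for_surface_atom_grouping
-- ===== SOURCE A (Python) =====
-- def generate_commands_for_surface_atom_grouping(domain_index_pair=[[1,2],[3,4]],domain_type_pair=[['HL','HL'],['FL_S','FL_L']],grouping_depth=[10,10]):
--     command_list=[]
--     HL=['O1O2_O7O8','Fe2Fe3_Fe8Fe9','O3O4_O9O10','Fe4Fe6_Fe10Fe12','O5O6_O11O12','O7O8_O1O2','Fe8Fe9_Fe2Fe3','O9O10_O3O4','Fe10Fe12_Fe4Fe6','O11O12_O5O6']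
--     HL_L=['O1O2_O7O8','Fe2Fe3_Fe8Fe9','O3O4_O9O10','Fe4Fe6_Fe10Fe12','O5O6_O11O12','O7O8_O1O2','Fe8Fe9_Fe2Fe3','O9O10_O3O4','Fe10Fe12_Fe4Fe6','O11O12_O5O6']
--     HL_S=['O7O8_O1O2','Fe8Fe9_Fe2Fe3','O9O10_O3O4','Fe10Fe12_Fe4Fe6','O11O12_O5O6','O1O2_O7O8','Fe2Fe3_Fe8Fe9','O3O4_O9O10','Fe4Fe6_Fe10Fe12','O5O6_O11O12']
--     FL_S=['O5O6_O11O12','O7O8_O1O2','Fe8Fe9_Fe2Fe3','O9O10_O3O4','Fe10Fe12_Fe4Fe6','O11O12_O5O6','O1O2_O7O8','Fe2Fe3_Fe8Fe9','O3O4_O9O10','Fe4Fe6_Fe10Fe12']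
--     FL_L=['O11O12_O5O6','O1O2_O7O8','Fe2Fe3_Fe8Fe9','O3O4_O9O10','Fe4Fe6_Fe10Fe12','O5O6_O11O12','O7O8_O1O2','Fe8Fe9_Fe2Fe3','O9O10_O3O4','Fe10Fe12_Fe4Fe6']
--     for i in range(len(domain_index_pair)):
--         if domain_type_pair[i]==['HL','HL']:
--             for j in range(10-grouping_depth[i],10):
--                 command_list.append('gp_'+HL[j]+'_D'+str(domain_index_pair[i][0])+'.setdx('+'gp_'+HL[j]+'_D'+str(domain_index_pair[i][1])+'.getdx())')
--                 command_list.append('gp_'+HL[j]+'_D'+str(domain_index_pair[i][0])+'.setdy('+'gp_'+HL[j]+'_D'+str(domain_index_pair[i][1])+'.getdy())')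
--                 command_list.append('gp_'+HL[j]+'_D'+str(domain_index_pair[i][0])+'.setdz('+'gp_'+HL[j]+'_D'+str(domain_index_pair[i][1])+'.getdz())')
--                 command_list.append('gp_'+HL[j]+'_D'+str(domain_index_pair[i][0])+'.setoc('+'gp_'+HL[j]+'_D'+str(domain_index_pair[i][1])+'.getoc())')
--         elif domain_type_pair[i]==['FL_S','FL_S']:
--             for j in range(10-grouping_depth[i],10):
--                 command_list.append('gp_'+FL_S[j]+'_D'+str(domain_index_pair[i][0])+'.setdx('+'gp_'+FL_S[j]+'_D'+str(domain_index_pair[i][1])+'.getdx())')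
--                 command_list.append('gp_'+FL_S[j]+'_D'+str(domain_index_pair[i][0])+'.setdy('+'gp_'+FL_S[j]+'_D'+str(domain_index_pair[i][1])+'.getdy())')
--                 command_list.append('gp_'+FL_S[j]+'_D'+str(domain_index_pair[i][0])+'.setdz('+'gp_'+FL_S[j]+'_D'+str(domain_index_pair[i][1])+'.getdz())')
--                 command_list.append('gp_'+FL_S[j]+'_D'+str(domain_index_pair[i][0])+'.setoc('+'gp_'+FL_S[j]+'_D'+str(domain_index_pair[i][1])+'.getoc())')
--         elif domain_type_pair[i]==['FL_L','FL_L']: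
--             for j in range(10-grouping_depth[i],10):
--                 command_list.append('gp_'+FL_L[j]+'_D'+str(domain_index_pair[i][0])+'.setdx('+'gp_'+FL_L[j]+'_D'+str(domain_index_pair[i][1])+'.getdx())')
--                 command_list.append('gp_'+FL_L[j]+'_D'+str(domain_index_pair[i][0])+'.setdy('+'gp_'+FL_L[j]+'_D'+str(domain_index_pair[i][1])+'.getdy())')
--                 command_list.append('gp_'+FL_L[j]+'_D'+str(domain_index_pair[i][0])+'.setdz('+'gp_'+FL_L[j]+'_D'+str(domain_index_pair[i][1])+'.getdz())')
--                 command_list.append('gp_'+FL_L[j]+'_D'+str(domain_index_pair[i][0])+'.setoc('+'gp_'+FL_L[j]+'_D'+str(domain_index_pair[i][1])+'.getoc())')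
--         elif domain_type_pair[i]==['FL_S','FL_L']:
--             for j in range(10-grouping_depth[i],10):
--                 command_list.append('gp_'+FL_S[j]+'_D'+str(domain_index_pair[i][0])+'.setdx('+'-gp_'+FL_L[j]+'_D'+str(domain_index_pair[i][1])+'.getdx())')
--                 command_list.append('gp_'+FL_S[j]+'_D'+str(domain_index_pair[i][0])+'.setdy('+'gp_'+FL_L[j]+'_D'+str(domain_index_pair[i][1])+'.getdy())')
--                 command_list.append('gp_'+FL_S[j]+'_D'+str(domain_index_pair[i][0])+'.setdz('+'gp_'+FL_L[j]+'_D'+str(domain_index_pair[i][1])+'.getdz())')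
--                 command_list.append('gp_'+FL_S[j]+'_D'+str(domain_index_pair[i][0])+'.setoc('+'gp_'+FL_L[j]+'_D'+str(domain_index_pair[i][1])+'.getoc())')
--         elif domain_type_pair[i]==['FL_L','FL_S']:
--             for j in range(10-grouping_depth[i],10):
--                 command_list.append('gp_'+FL_L[j]+'_D'+str(domain_index_pair[i][0])+'.setdx('+'-gp_'+FL_S[j]+'_D'+str(domain_index_pair[i][1])+'.getdx())')
--                 command_list.append('gp_'+FL_L[j]+'_D'+str(domain_index_pair[i][0])+'.setdy('+'gp_'+FL_S[j]+'_D'+str(domain_index_pair[i][1])+'.getdy())')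
--                 command_list.append('gp_'+FL_L[j]+'_D'+str(domain_index_pair[i][0])+'.setdz('+'gp_'+FL_S[j]+'_D'+str(domain_index_pair[i][1])+'.getdz())')
--                 command_list.append('gp_'+FL_L[j]+'_D'+str(domain_index_pair[i][0])+'.setoc('+'gp_'+FL_S[j]+'_D'+str(domain_index_pair[i][1])+'.getoc())')
--
--         elif domain_type_pair[i]==['HL_S','HL_S']:
--             for j in range(10-grouping_depth[i],10):
--                 command_list.append('gp_'+HL_S[j]+'_D'+str(domain_index_pair[i][0])+'.setdx('+'gp_'+HL_S[j]+'_D'+str(domain_index_pair[i][1])+'.getdx())')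
--                 command_list.append('gp_'+HL_S[j]+'_D'+str(domain_index_pair[i][0])+'.setdy('+'gp_'+HL_S[j]+'_D'+str(domain_index_pair[i][1])+'.getdy())')
--                 command_list.append('gp_'+HL_S[j]+'_D'+str(domain_index_pair[i][0])+'.setdz('+'gp_'+HL_S[j]+'_D'+str(domain_index_pair[i][1])+'.getdz())')
--                 command_list.append('gp_'+HL_S[j]+'_D'+str(domain_index_pair[i][0])+'.setoc('+'gp_'+HL_S[j]+'_D'+str(domain_index_pair[i][1])+'.getoc())')
--         elif domain_type_pair[i]==['HL_L','HL_L']: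
--             for j in range(10-grouping_depth[i],10):
--                 command_list.append('gp_'+HL_L[j]+'_D'+str(domain_index_pair[i][0])+'.setdx('+'gp_'+HL_L[j]+'_D'+str(domain_index_pair[i][1])+'.getdx())')
--                 command_list.append('gp_'+HL_L[j]+'_D'+str(domain_index_pair[i][0])+'.setdy('+'gp_'+HL_L[j]+'_D'+str(domain_index_pair[i][1])+'.getdy())')
--                 command_list.append('gp_'+HL_L[j]+'_D'+str(domain_index_pair[i][0])+'.setdz('+'gp_'+HL_L[j]+'_D'+str(domain_index_pair[i][1])+'.getdz())')
--                 command_list.append('gp_'+HL_L[j]+'_D'+str(domain_index_pair[i][0])+'.setoc('+'gp_'+HL_L[j]+'_D'+str(domain_index_pair[i][1])+'.getoc())')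
--         elif domain_type_pair[i]==['HL_S','HL_L']:
--             for j in range(10-grouping_depth[i],10):
--                 command_list.append('gp_'+HL_S[j]+'_D'+str(domain_index_pair[i][0])+'.setdx('+'-gp_'+HL_L[j]+'_D'+str(domain_index_pair[i][1])+'.getdx())')
--                 command_list.append('gp_'+HL_S[j]+'_D'+str(domain_index_pair[i][0])+'.setdy('+'gp_'+HL_L[j]+'_D'+str(domain_index_pair[i][1])+'.getdy())')
--                 command_list.append('gp_'+HL_S[j]+'_D'+str(domain_index_pair[i][0])+'.setdz('+'gp_'+HL_L[j]+'_D'+str(domain_index_pair[i][1])+'.getdz())')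
--                 command_list.append('gp_'+HL_S[j]+'_D'+str(domain_index_pair[i][0])+'.setoc('+'gp_'+HL_L[j]+'_D'+str(domain_index_pair[i][1])+'.getoc())')
--         elif domain_type_pair[i]==['HL_L','HL_S']:
--             for j in range(10-grouping_depth[i],10):
--                 command_list.append('gp_'+HL_L[j]+'_D'+str(domain_index_pair[i][0])+'.setdx('+'-gp_'+HL_S[j]+'_D'+str(domain_index_pair[i][1])+'.getdx())')
--                 command_list.append('gp_'+HL_L[j]+'_D'+str(domain_index_pair[i][0])+'.setdy('+'gp_'+HL_S[j]+'_D'+str(domain_index_pair[i][1])+'.getdy())')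
--                 command_list.append('gp_'+HL_L[j]+'_D'+str(domain_index_pair[i][0])+'.setdz('+'gp_'+HL_S[j]+'_D'+str(domain_index_pair[i][1])+'.getdz())')
--                 command_list.append('gp_'+HL_L[j]+'_D'+str(domain_index_pair[i][0])+'.setoc('+'gp_'+HL_S[j]+'_D'+str(domain_index_pair[i][1])+'.getoc())')
--
--     return command_list
-- ===== SOURCE B (Python) =====
-- def generate_commands_for_surface_atom_grouping(domain_index_pair=[[1,2],[3,4]],domain_type_pair=[['HL','HL'],['FL_S','FL_L']],grouping_depth=[10,10]):
--     # All five of A's group-name lists are rotations of one base list, so instead of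
--     # storing them we rotate by index arithmetic: tag -> (family, rotation offset);
--     # a pair is handled iff both tags share a family, and dx gets '-' iff the tags differ.
--     base=['O1O2_O7O8','Fe2Fe3_Fe8Fe9','O3O4_O9O10','Fe4Fe6_Fe10Fe12','O5O6_O11O12','O7O8_O1O2','Fe8Fe9_Fe2Fe3','O9O10_O3O4','Fe10Fe12_Fe4Fe6','O11O12_O5O6']
--     info={'HL':(0,0),'HL_L':(1,0),'HL_S':(1,5),'FL_S':(2,4),'FL_L':(2,9)}
--     cmds=[]
--     for i in range(len(domain_index_pair)):
--         t=domain_type_pair[i]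
--         if len(t)!=2 or t[0] not in info or t[1] not in info or info[t[0]][0]!=info[t[1]][0]:
--             continue
--         oa,ob=info[t[0]][1],info[t[1]][1]
--         s='-' if t[0]!=t[1] else ''
--         pair=domain_index_pair[i]
--         for j in range(10-grouping_depth[i],10):
--             for at in ('dx','dy','dz','oc'):
--                 cmds.append('gp_'+base[(j+oa)%10]+'_D'+str(pair[0])+'.set'+at+'('
--                             +(s if at=='dx' else '')
--                             +'gp_'+base[(j+ob)%10]+'_D'+str(pair[1])+'.get'+at+'())')
--     return cmds
-- ===== Notes on version B (the rewrite author's own statement) =====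
-- stated objective: simpler
-- what changed: Replaces A's five hand-written 10-element group-name lists and 9-branch if/elif chain of copy-pasted 4-append loops by modular index arithmetic over one base list: each tag maps to a (family, rotation offset) pair, a type pair is handled iff the families match, the emitted name is base[(j+offset)%10], and the dx minus sign is derived from tag inequality.
import Mathlib
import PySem

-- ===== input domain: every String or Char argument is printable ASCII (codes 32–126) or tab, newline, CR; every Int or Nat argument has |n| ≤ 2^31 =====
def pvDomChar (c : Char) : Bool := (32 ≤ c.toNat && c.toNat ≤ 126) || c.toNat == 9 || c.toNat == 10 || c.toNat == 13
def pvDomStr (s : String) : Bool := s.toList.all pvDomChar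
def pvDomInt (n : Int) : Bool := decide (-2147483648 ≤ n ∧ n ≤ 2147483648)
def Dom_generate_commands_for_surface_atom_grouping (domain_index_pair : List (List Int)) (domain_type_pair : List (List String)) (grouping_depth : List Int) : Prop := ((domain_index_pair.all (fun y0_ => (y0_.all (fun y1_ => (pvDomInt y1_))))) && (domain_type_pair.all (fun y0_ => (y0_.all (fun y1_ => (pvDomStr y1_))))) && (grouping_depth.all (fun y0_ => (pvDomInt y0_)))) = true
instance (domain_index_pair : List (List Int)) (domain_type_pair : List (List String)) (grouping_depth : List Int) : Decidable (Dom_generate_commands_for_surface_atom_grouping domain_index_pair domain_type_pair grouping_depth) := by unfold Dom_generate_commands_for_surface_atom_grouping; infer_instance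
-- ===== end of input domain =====

-- B replaces A's five hand-written group-name lists and 9-branch if/elif chain of copy-pasted
-- 4-append loops by modular index arithmetic: every list is a rotation of one base list, so B
-- stores only (family, rotation offset) per tag and emits base[(j+off)%10], deriving the dx minus
-- sign from tag inequality (objective: simpler). Return-value equivalence; no argument is mutated.

-- ===== PORT A =====
def pvHL : List String := ["O1O2_O7O8","Fe2Fe3_Fe8Fe9","O3O4_O9O10","Fe4Fe6_Fe10Fe12","O5O6_O11O12","O7O8_O1O2","Fe8Fe9_Fe2Fe3","O9O10_O3O4","Fe10Fe12_Fe4Fe6","O11O12_O5O6"]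
def pvHL_L : List String := ["O1O2_O7O8","Fe2Fe3_Fe8Fe9","O3O4_O9O10","Fe4Fe6_Fe10Fe12","O5O6_O11O12","O7O8_O1O2","Fe8Fe9_Fe2Fe3","O9O10_O3O4","Fe10Fe12_Fe4Fe6","O11O12_O5O6"]
def pvHL_S : List String := ["O7O8_O1O2","Fe8Fe9_Fe2Fe3","O9O10_O3O4","Fe10Fe12_Fe4Fe6","O11O12_O5O6","O1O2_O7O8","Fe2Fe3_Fe8Fe9","O3O4_O9O10","Fe4Fe6_Fe10Fe12","O5O6_O11O12"]
def pvFL_S : List String := ["O5O6_O11O12","O7O8_O1O2","Fe8Fe9_Fe2Fe3","O9O10_O3O4","Fe10Fe12_Fe4Fe6","O11O12_O5O6","O1O2_O7O8","Fe2Fe3_Fe8Fe9","O3O4_O9O10","Fe4Fe6_Fe10Fe12"]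
def pvFL_L : List String := ["O11O12_O5O6","O1O2_O7O8","Fe2Fe3_Fe8Fe9","O3O4_O9O10","Fe4Fe6_Fe10Fe12","O5O6_O11O12","O7O8_O1O2","Fe8Fe9_Fe2Fe3","O9O10_O3O4","Fe10Fe12_Fe4Fe6"]

-- one branch body of A: the 'for j in range(10-grouping_depth[i],10)' loop with its four appends;
-- sg is the literal A writes before the right-hand group name in the setdx line ("gp_" or "-gp_")
def pvA_block (L1 L2 : List String) (sg : String) (dipi : List Int) (g : Int) (acc : List String) : List String :=
  (PySem.List.pyRange (10 - g) 10 1).foldl (fun acc j =>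
    let acc := acc ++ ["gp_" ++ PySem.List.pyGetD L1 j "" ++ "_D" ++ PySem.Int.toStr (PySem.List.pyGetD dipi 0 0) ++ ".setdx(" ++ sg ++ PySem.List.pyGetD L2 j "" ++ "_D" ++ PySem.Int.toStr (PySem.List.pyGetD dipi 1 0) ++ ".getdx())"]
    let acc := acc ++ ["gp_" ++ PySem.List.pyGetD L1 j "" ++ "_D" ++ PySem.Int.toStr (PySem.List.pyGetD dipi 0 0) ++ ".setdy(" ++ "gp_" ++ PySem.List.pyGetD L2 j "" ++ "_D" ++ PySem.Int.toStr (PySem.List.pyGetD dipi 1 0) ++ ".getdy())"]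
    let acc := acc ++ ["gp_" ++ PySem.List.pyGetD L1 j "" ++ "_D" ++ PySem.Int.toStr (PySem.List.pyGetD dipi 0 0) ++ ".setdz(" ++ "gp_" ++ PySem.List.pyGetD L2 j "" ++ "_D" ++ PySem.Int.toStr (PySem.List.pyGetD dipi 1 0) ++ ".getdz())"]
    acc ++ ["gp_" ++ PySem.List.pyGetD L1 j "" ++ "_D" ++ PySem.Int.toStr (PySem.List.pyGetD dipi 0 0) ++ ".setoc(" ++ "gp_" ++ PySem.List.pyGetD L2 j "" ++ "_D" ++ PySem.Int.toStr (PySem.List.pyGetD dipi 1 0) ++ ".getoc())"]) acc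

-- the body of A's outer loop at index i (ts = domain_type_pair[i], dipi = domain_index_pair[i], g = grouping_depth[i])
def pvStepA (ts : List String) (dipi : List Int) (g : Int) (acc : List String) : List String :=
  if ts = ["HL","HL"] then pvA_block pvHL pvHL "gp_" dipi g acc
  else if ts = ["FL_S","FL_S"] then pvA_block pvFL_S pvFL_S "gp_" dipi g acc
  else if ts = ["FL_L","FL_L"] then pvA_block pvFL_L pvFL_L "gp_" dipi g acc
  else if ts = ["FL_S","FL_L"] then pvA_block pvFL_S pvFL_L "-gp_" dipi g acc
  else if ts = ["FL_L","FL_S"] then pvA_block pvFL_L pvFL_S "-gp_" dipi g acc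
  else if ts = ["HL_S","HL_S"] then pvA_block pvHL_S pvHL_S "gp_" dipi g acc
  else if ts = ["HL_L","HL_L"] then pvA_block pvHL_L pvHL_L "gp_" dipi g acc
  else if ts = ["HL_S","HL_L"] then pvA_block pvHL_S pvHL_L "-gp_" dipi g acc
  else if ts = ["HL_L","HL_S"] then pvA_block pvHL_L pvHL_S "-gp_" dipi g acc
  else acc

def generate_commands_for_surface_atom_grouping (domain_index_pair : List (List Int)) (domain_type_pair : List (List String)) (grouping_depth : List Int) : List String :=
  (PySem.List.pyRange 0 (PySem.List.len domain_index_pair) 1).foldl (fun acc i =>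
    pvStepA (PySem.List.pyGetD domain_type_pair i []) (PySem.List.pyGetD domain_index_pair i []) (PySem.List.pyGetD grouping_depth i 0) acc) []

-- ===== PORT B =====
-- Source B's base list and its tag -> (family, rotation offset) dict
def pvBase : List String := ["O1O2_O7O8","Fe2Fe3_Fe8Fe9","O3O4_O9O10","Fe4Fe6_Fe10Fe12","O5O6_O11O12","O7O8_O1O2","Fe8Fe9_Fe2Fe3","O9O10_O3O4","Fe10Fe12_Fe4Fe6","O11O12_O5O6"]
def pvInfo : PySem.Dict String (Int × Int) :=
  PySem.Dict.mk [("HL", (0, 0)), ("HL_L", (1, 0)), ("HL_S", (1, 5)), ("FL_S", (2, 4)), ("FL_L", (2, 9))]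

-- Source B's inner double loop: for j in range(10-g,10): for at in ('dx','dy','dz','oc'): append(...)
def pvEmitB (oa ob : Int) (s : String) (pair : List Int) (g : Int) : List String :=
  (PySem.List.pyRange (10 - g) 10 1).flatMap (fun j =>
    (["dx","dy","dz","oc"] : List String).map (fun att =>
      "gp_" ++ PySem.List.pyGetD pvBase (PySem.Int.mod (j + oa) 10) "" ++ "_D" ++ PySem.Int.toStr (PySem.List.pyGetD pair 0 0) ++ ".set" ++ att ++ "("
        ++ (if att == "dx" then s else "")
        ++ "gp_" ++ PySem.List.pyGetD pvBase (PySem.Int.mod (j + ob) 10) "" ++ "_D" ++ PySem.Int.toStr (PySem.List.pyGetD pair 1 0) ++ ".get" ++ att ++ "())"))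

-- the body of Source B's outer loop at index i
def pvStepB (ts : List String) (dipi : List Int) (g : Int) (cmds : List String) : List String :=
  if ts.length = 2 then
    match pvInfo.get? (PySem.List.pyGetD ts 0 ""), pvInfo.get? (PySem.List.pyGetD ts 1 "") with
    | some (fa, oa), some (fb, ob) =>
      if fa = fb then
        cmds ++ pvEmitB oa ob (if PySem.List.pyGetD ts 0 "" ≠ PySem.List.pyGetD ts 1 "" then "-" else "") dipi g
      else cmds
    | _, _ => cmds
  else cmds

def generate_commands_for_surface_atom_grouping_alt (domain_index_pair : List (List Int)) (domain_type_pair : List (List String)) (grouping_depth : List Int) : List String :=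
  (PySem.List.pyRange 0 (PySem.List.len domain_index_pair) 1).foldl (fun cmds i =>
    pvStepB (PySem.List.pyGetD domain_type_pair i []) (PySem.List.pyGetD domain_index_pair i []) (PySem.List.pyGetD grouping_depth i 0) cmds) []

-- ===== PRECONDITION & SPEC =====
def pvHandled : List (List String) := [["HL","HL"],["FL_S","FL_S"],["FL_L","FL_L"],["FL_S","FL_L"],["FL_L","FL_S"],["HL_S","HL_S"],["HL_L","HL_L"],["HL_S","HL_L"],["HL_L","HL_S"]]

-- Pre_ excludes exactly the inputs on which the Python A raises (IndexError): a domain index pair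
-- missing its type pair or (on a handled type pair with a non-empty j-range) its grouping depth,
-- a grouping depth above 20 (list index out of range inside the j loop), or an index pair with
-- fewer than two entries.
def Pre_generate_commands_for_surface_atom_grouping (domain_index_pair : List (List Int)) (domain_type_pair : List (List String)) (grouping_depth : List Int) : Prop :=
  ∀ k : Nat, k < domain_index_pair.length →
    k < domain_type_pair.length ∧
    (domain_type_pair.getD k [] ∈ pvHandled →
      k < grouping_depth.length ∧
      (grouping_depth.getD k 0 ≤ 0 ∨
        (grouping_depth.getD k 0 ≤ 20 ∧ 2 ≤ (domain_index_pair.getD k []).length)))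
instance (domain_index_pair : List (List Int)) (domain_type_pair : List (List String)) (grouping_depth : List Int) : Decidable (Pre_generate_commands_for_surface_atom_grouping domain_index_pair domain_type_pair grouping_depth) := by unfold Pre_generate_commands_for_surface_atom_grouping; infer_instance

def pvWitness_generate_commands_for_surface_atom_grouping : List (List Int) × List (List String) × List Int :=
  ([[1,2],[3,4]], [["HL","HL"],["FL_S","FL_L"]], [10,10])

def Spec_generate_commands_for_surface_atom_grouping (domain_index_pair : List (List Int)) (domain_type_pair : List (List String)) (grouping_depth : List Int) (out : List String) : Prop := out = generate_commands_for_surface_atom_grouping_alt domain_index_pair domain_type_pair grouping_depth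
instance (domain_index_pair : List (List Int)) (domain_type_pair : List (List String)) (grouping_depth : List Int) (out : List String) : Decidable (Spec_generate_commands_for_surface_atom_grouping domain_index_pair domain_type_pair grouping_depth out) := by unfold Spec_generate_commands_for_surface_atom_grouping; infer_instance

-- ===== CLAIM (what is proved, stated in full; the proofs are below) =====
def Claim_equal_generate_commands_for_surface_atom_grouping : Prop := ∀ (domain_index_pair : List (List Int)) (domain_type_pair : List (List String)) (grouping_depth : List Int), Dom_generate_commands_for_surface_atom_grouping domain_index_pair domain_type_pair grouping_depth → Pre_generate_commands_for_surface_atom_grouping domain_index_pair domain_type_pair grouping_depth → Spec_generate_commands_for_surface_atom_grouping domain_index_pair domain_type_pair grouping_depth (generate_commands_for_surface_atom_grouping domain_index_pair domain_type_pair grouping_depth)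

-- ===== LEMMAS AND PROOFS =====

theorem pv_strA (p q r : String) (h : p ++ q = r) (s : String) : p ++ (q ++ s) = r ++ s := by
  rw [← String.append_assoc, h]

-- the four strings Source B's inner attribute loop emits at one j equal A's four appended strings
theorem pv_quad (x s y t sign : String) :
    (["dx","dy","dz","oc"] : List String).map (fun att =>
      "gp_" ++ x ++ "_D" ++ s ++ ".set" ++ att ++ "("
        ++ (if att == "dx" then sign else "")
        ++ "gp_" ++ y ++ "_D" ++ t ++ ".get" ++ att ++ "())")
    = ["gp_" ++ x ++ "_D" ++ s ++ ".setdx(" ++ (sign ++ "gp_") ++ y ++ "_D" ++ t ++ ".getdx())",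
       "gp_" ++ x ++ "_D" ++ s ++ ".setdy(" ++ "gp_" ++ y ++ "_D" ++ t ++ ".getdy())",
       "gp_" ++ x ++ "_D" ++ s ++ ".setdz(" ++ "gp_" ++ y ++ "_D" ++ t ++ ".getdz())",
       "gp_" ++ x ++ "_D" ++ s ++ ".setoc(" ++ "gp_" ++ y ++ "_D" ++ t ++ ".getoc())"] := by
  simp only [List.map_cons, List.map_nil,
    show ∀ z : String, (if (("dx":String) == "dx") = true then z else "") = z from fun _ => rfl,
    show ∀ z : String, (if (("dy":String) == "dx") = true then z else "") = "" from fun _ => rfl,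
    show ∀ z : String, (if (("dz":String) == "dx") = true then z else "") = "" from fun _ => rfl,
    show ∀ z : String, (if (("oc":String) == "dx") = true then z else "") = "" from fun _ => rfl,
    String.append_assoc,
    pv_strA ".set" "dx" ".setdx" rfl, pv_strA ".setdx" "(" ".setdx(" rfl,
    pv_strA ".set" "dy" ".setdy" rfl, pv_strA ".setdy" "(" ".setdy(" rfl,
    pv_strA ".set" "dz" ".setdz" rfl, pv_strA ".setdz" "(" ".setdz(" rfl,
    pv_strA ".set" "oc" ".setoc" rfl, pv_strA ".setoc" "(" ".setoc(" rfl,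
    pv_strA ".get" "dx" ".getdx" rfl, pv_strA ".get" "dy" ".getdy" rfl,
    pv_strA ".get" "dz" ".getdz" rfl, pv_strA ".get" "oc" ".getoc" rfl,
    show (".getdx" : String) ++ "())" = ".getdx())" from rfl,
    show (".getdy" : String) ++ "())" = ".getdy())" from rfl,
    show (".getdz" : String) ++ "())" = ".getdz())" from rfl,
    show (".getoc" : String) ++ "())" = ".getoc())" from rfl,
    String.empty_append]

-- each of A's lists is pvBase rotated: on the indices the j loop can reach inside Pre_,
-- A's L[j] is B's base[(j+off)%10]
def pvRotFact (L : List String) (off : Int) : Prop :=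
  ∀ j : Int, -10 ≤ j → j < 10 → PySem.List.pyGetD L j "" = PySem.List.pyGetD pvBase (PySem.Int.mod (j + off) 10) ""

theorem pv_rot_of (L : List String) (off : Int)
    (h : ∀ j ∈ PySem.List.pyRange (-10) 10 1, PySem.List.pyGetD L j "" = PySem.List.pyGetD pvBase (PySem.Int.mod (j + off) 10) "") :
    pvRotFact L off :=
  fun j h1 h2 => h j (PySem.List.mem_pyRange_one.mpr ⟨h1, h2⟩)

set_option maxHeartbeats 1000000 in
theorem pv_rotHL : pvRotFact pvHL 0 := pv_rot_of pvHL 0 (by decide)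
set_option maxHeartbeats 1000000 in
theorem pv_rotHL_L : pvRotFact pvHL_L 0 := pv_rot_of pvHL_L 0 (by decide)
set_option maxHeartbeats 1000000 in
theorem pv_rotHL_S : pvRotFact pvHL_S 5 := pv_rot_of pvHL_S 5 (by decide)
set_option maxHeartbeats 1000000 in
theorem pv_rotFL_S : pvRotFact pvFL_S 4 := pv_rot_of pvFL_S 4 (by decide)
set_option maxHeartbeats 1000000 in
theorem pv_rotFL_L : pvRotFact pvFL_L 9 := pv_rot_of pvFL_L 9 (by decide)

-- one A branch body equals appending B's modular-rotation emit block, for any j-list within bounds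
theorem pv_aux (L1 L2 : List String) (oa ob : Int) (sign : String) (dipi : List Int)
    (h1 : pvRotFact L1 oa) (h2 : pvRotFact L2 ob)
    (l : List Int) (hmem : ∀ j ∈ l, -10 ≤ j ∧ j < 10) (acc : List String) :
    l.foldl (fun acc j =>
      let acc := acc ++ ["gp_" ++ PySem.List.pyGetD L1 j "" ++ "_D" ++ PySem.Int.toStr (PySem.List.pyGetD dipi 0 0) ++ ".setdx(" ++ (sign ++ "gp_") ++ PySem.List.pyGetD L2 j "" ++ "_D" ++ PySem.Int.toStr (PySem.List.pyGetD dipi 1 0) ++ ".getdx())"]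
      let acc := acc ++ ["gp_" ++ PySem.List.pyGetD L1 j "" ++ "_D" ++ PySem.Int.toStr (PySem.List.pyGetD dipi 0 0) ++ ".setdy(" ++ "gp_" ++ PySem.List.pyGetD L2 j "" ++ "_D" ++ PySem.Int.toStr (PySem.List.pyGetD dipi 1 0) ++ ".getdy())"]
      let acc := acc ++ ["gp_" ++ PySem.List.pyGetD L1 j "" ++ "_D" ++ PySem.Int.toStr (PySem.List.pyGetD dipi 0 0) ++ ".setdz(" ++ "gp_" ++ PySem.List.pyGetD L2 j "" ++ "_D" ++ PySem.Int.toStr (PySem.List.pyGetD dipi 1 0) ++ ".getdz())"]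
      acc ++ ["gp_" ++ PySem.List.pyGetD L1 j "" ++ "_D" ++ PySem.Int.toStr (PySem.List.pyGetD dipi 0 0) ++ ".setoc(" ++ "gp_" ++ PySem.List.pyGetD L2 j "" ++ "_D" ++ PySem.Int.toStr (PySem.List.pyGetD dipi 1 0) ++ ".getoc())"]) acc
    = acc ++ l.flatMap (fun j =>
        (["dx","dy","dz","oc"] : List String).map (fun att =>
          "gp_" ++ PySem.List.pyGetD pvBase (PySem.Int.mod (j + oa) 10) "" ++ "_D" ++ PySem.Int.toStr (PySem.List.pyGetD dipi 0 0) ++ ".set" ++ att ++ "("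
            ++ (if att == "dx" then sign else "")
            ++ "gp_" ++ PySem.List.pyGetD pvBase (PySem.Int.mod (j + ob) 10) "" ++ "_D" ++ PySem.Int.toStr (PySem.List.pyGetD dipi 1 0) ++ ".get" ++ att ++ "())")) := by
  induction l generalizing acc with
  | nil => simp
  | cons a l ih =>
    obtain ⟨ha1, ha2⟩ := hmem a (List.mem_cons_self)
    rw [List.foldl_cons, ih (fun j hj => hmem j (List.mem_cons_of_mem _ hj)), List.flatMap_cons,
      pv_quad, ← h1 a ha1 ha2, ← h2 a ha1 ha2]
    simp [List.append_assoc]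

theorem pv_block_emit (L1 L2 : List String) (oa ob : Int) (dipi : List Int) (g : Int) (sg sign : String)
    (hs : sign ++ "gp_" = sg) (h1 : pvRotFact L1 oa) (h2 : pvRotFact L2 ob)
    (hg : g ≤ 0 ∨ g ≤ 20) (acc : List String) :
    pvA_block L1 L2 sg dipi g acc = acc ++ pvEmitB oa ob sign dipi g := by
  subst hs
  unfold pvA_block pvEmitB
  exact pv_aux L1 L2 oa ob sign dipi h1 h2 _
    (fun j hj => by rw [PySem.List.mem_pyRange_one] at hj; omega) acc

-- the per-index loop bodies of the two ports agree under Pre_'s depth bound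
theorem pv_body (ts : List String) (dipi : List Int) (g : Int)
    (hg : ts ∈ pvHandled → g ≤ 0 ∨ g ≤ 20) (acc : List String) :
    pvStepA ts dipi g acc = pvStepB ts dipi g acc := by
  rcases ts with _ | ⟨a, _ | ⟨b, _ | ⟨c, r⟩⟩⟩
  · simp [pvStepA, pvStepB]
  · simp [pvStepA, pvStepB]
  case cons.cons.cons => simp [pvStepA, pvStepB]
  -- the two-element case
  · by_cases hA : a = "HL" ∨ a = "HL_L" ∨ a = "HL_S" ∨ a = "FL_S" ∨ a = "FL_L"
    · rcases hA with rfl | rfl | rfl | rfl | rfl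
      · by_cases hB : b = "HL" ∨ b = "HL_L" ∨ b = "HL_S" ∨ b = "FL_S" ∨ b = "FL_L"
        · rcases hB with rfl | rfl | rfl | rfl | rfl
          · exact pv_block_emit pvHL pvHL 0 0 dipi g "gp_" "" rfl pv_rotHL pv_rotHL (hg (by decide)) acc
          · rfl
          · rfl
          · rfl
          · rfl
        · push_neg at hB
          obtain ⟨n1, n2, n3, n4, n5⟩ := hB
          have hb : pvInfo.get? b = none := by
            simp [pvInfo, PySem.Dict.get?_mk_cons, Ne.symm n1, Ne.symm n2, Ne.symm n3, Ne.symm n4, Ne.symm n5]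
            rfl
          simp [pvStepA, pvStepB,
            show PySem.List.pyGetD (["HL", b] : List String) 1 "" = b from rfl, hb,
            n1, n2, n3, n4, n5]
      · by_cases hB : b = "HL" ∨ b = "HL_L" ∨ b = "HL_S" ∨ b = "FL_S" ∨ b = "FL_L"
        · rcases hB with rfl | rfl | rfl | rfl | rfl
          · rfl
          · exact pv_block_emit pvHL_L pvHL_L 0 0 dipi g "gp_" "" rfl pv_rotHL_L pv_rotHL_L (hg (by decide)) acc
          · exact pv_block_emit pvHL_L pvHL_S 0 5 dipi g "-gp_" "-" rfl pv_rotHL_L pv_rotHL_S (hg (by decide)) acc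
          · rfl
          · rfl
        · push_neg at hB
          obtain ⟨n1, n2, n3, n4, n5⟩ := hB
          have hb : pvInfo.get? b = none := by
            simp [pvInfo, PySem.Dict.get?_mk_cons, Ne.symm n1, Ne.symm n2, Ne.symm n3, Ne.symm n4, Ne.symm n5]
            rfl
          simp [pvStepA, pvStepB,
            show PySem.List.pyGetD (["HL_L", b] : List String) 1 "" = b from rfl, hb,
            n1, n2, n3, n4, n5]
      · by_cases hB : b = "HL" ∨ b = "HL_L" ∨ b = "HL_S" ∨ b = "FL_S" ∨ b = "FL_L"
        · rcases hB with rfl | rfl | rfl | rfl | rfl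
          · rfl
          · exact pv_block_emit pvHL_S pvHL_L 5 0 dipi g "-gp_" "-" rfl pv_rotHL_S pv_rotHL_L (hg (by decide)) acc
          · exact pv_block_emit pvHL_S pvHL_S 5 5 dipi g "gp_" "" rfl pv_rotHL_S pv_rotHL_S (hg (by decide)) acc
          · rfl
          · rfl
        · push_neg at hB
          obtain ⟨n1, n2, n3, n4, n5⟩ := hB
          have hb : pvInfo.get? b = none := by
            simp [pvInfo, PySem.Dict.get?_mk_cons, Ne.symm n1, Ne.symm n2, Ne.symm n3, Ne.symm n4, Ne.symm n5]
            rfl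
          simp [pvStepA, pvStepB,
            show PySem.List.pyGetD (["HL_S", b] : List String) 1 "" = b from rfl, hb,
            n1, n2, n3, n4, n5]
      · by_cases hB : b = "HL" ∨ b = "HL_L" ∨ b = "HL_S" ∨ b = "FL_S" ∨ b = "FL_L"
        · rcases hB with rfl | rfl | rfl | rfl | rfl
          · rfl
          · rfl
          · rfl
          · exact pv_block_emit pvFL_S pvFL_S 4 4 dipi g "gp_" "" rfl pv_rotFL_S pv_rotFL_S (hg (by decide)) acc
          · exact pv_block_emit pvFL_S pvFL_L 4 9 dipi g "-gp_" "-" rfl pv_rotFL_S pv_rotFL_L (hg (by decide)) acc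
        · push_neg at hB
          obtain ⟨n1, n2, n3, n4, n5⟩ := hB
          have hb : pvInfo.get? b = none := by
            simp [pvInfo, PySem.Dict.get?_mk_cons, Ne.symm n1, Ne.symm n2, Ne.symm n3, Ne.symm n4, Ne.symm n5]
            rfl
          simp [pvStepA, pvStepB,
            show PySem.List.pyGetD (["FL_S", b] : List String) 1 "" = b from rfl, hb,
            n1, n2, n3, n4, n5]
      · by_cases hB : b = "HL" ∨ b = "HL_L" ∨ b = "HL_S" ∨ b = "FL_S" ∨ b = "FL_L"
        · rcases hB with rfl | rfl | rfl | rfl | rfl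
          · rfl
          · rfl
          · rfl
          · exact pv_block_emit pvFL_L pvFL_S 9 4 dipi g "-gp_" "-" rfl pv_rotFL_L pv_rotFL_S (hg (by decide)) acc
          · exact pv_block_emit pvFL_L pvFL_L 9 9 dipi g "gp_" "" rfl pv_rotFL_L pv_rotFL_L (hg (by decide)) acc
        · push_neg at hB
          obtain ⟨n1, n2, n3, n4, n5⟩ := hB
          have hb : pvInfo.get? b = none := by
            simp [pvInfo, PySem.Dict.get?_mk_cons, Ne.symm n1, Ne.symm n2, Ne.symm n3, Ne.symm n4, Ne.symm n5]
            rfl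
          simp [pvStepA, pvStepB,
            show PySem.List.pyGetD (["FL_L", b] : List String) 1 "" = b from rfl, hb,
            n1, n2, n3, n4, n5]
    · push_neg at hA
      obtain ⟨n1, n2, n3, n4, n5⟩ := hA
      have ha : pvInfo.get? a = none := by
        simp [pvInfo, PySem.Dict.get?_mk_cons, Ne.symm n1, Ne.symm n2, Ne.symm n3, Ne.symm n4, Ne.symm n5]
        rfl
      simp [pvStepA, pvStepB,
        show PySem.List.pyGetD ([a, b] : List String) 0 "" = a from rfl, ha,
        n1, n2, n3, n4, n5]

theorem pv_witness_ok : Dom_generate_commands_for_surface_atom_grouping (pvWitness_generate_commands_for_surface_atom_grouping.1) (pvWitness_generate_commands_for_surface_atom_grouping.2.1) (pvWitness_generate_commands_for_surface_atom_grouping.2.2) ∧ Pre_generate_commands_for_surface_atom_grouping (pvWitness_generate_commands_for_surface_atom_grouping.1) (pvWitness_generate_commands_for_surface_atom_grouping.2.1) (pvWitness_generate_commands_for_surface_atom_grouping.2.2) := by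
  decide

-- ===== VERDICT (by name: the statement is the Claim_ definition above) =====
theorem generate_commands_for_surface_atom_grouping_spec : Claim_equal_generate_commands_for_surface_atom_grouping := by
  intro dip dtp gd _ hpre
  unfold Spec_generate_commands_for_surface_atom_grouping
  unfold generate_commands_for_surface_atom_grouping generate_commands_for_surface_atom_grouping_alt
  apply PySem.List.foldl_congr_mem
  intro acc i hi
  rw [PySem.List.mem_pyRange_one] at hi
  obtain ⟨hi0, hilt⟩ := hi
  have hidx : i = ((i.toNat : Nat) : Int) := (Int.toNat_of_nonneg hi0).symm
  have hk : i.toNat < dip.length := by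
    simp only [PySem.List.len_eq] at hilt; omega
  obtain ⟨_, hpre2⟩ := hpre i.toNat hk
  apply pv_body
  intro hmem
  rw [hidx] at hmem ⊢
  simp only [PySem.List.pyGetD_natCast] at hmem ⊢
  obtain ⟨_, h⟩ := hpre2 hmem
  omega
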